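-- pv_equiv track=rewrite | github.com/raghuveer125/ClawWorker_18_03_26 | engines/fyersN7/fyers-2026-03-05/scripts/forensics_generate_triggers.py | find_regime_context
-- ===== SOURCE A (Python) =====
-- from typing import Dict, List, Optional, Tuple
--
-- def time_to_seconds(t: str) -> Optional[int]:
--     raw = (t or "").strip()
--     if not raw:
--         return None
--     parts = raw.split(":")
--     if len(parts) == 2:
--         raw = f"{raw}:00"
--         parts = raw.split(":")
--     if len(parts) != 3:
--         return None
--     try:
--         h = int(parts[0]); m = int(parts[1]); s = int(parts[2])
--         return h * 3600 + m * 60 + s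
--     except Exception:
--         return None
--
-- def find_regime_context(
--     regimes: List[Dict[str, str]],
--     t_sec: int,
-- ) -> Dict[str, str]:
--     fallback = {
--         "regime": "",
--         "vol_state": "",
--         "confidence": "",
--         "duration_min": "",
--         "start_time": "",
--         "end_time": "",
--     }
--     if not regimes:
--         return fallback
--
--     best = None
--     best_dist = None
--     for r in regimes:
--         s = time_to_seconds(r.get("start_time", ""))
--         e = time_to_seconds(r.get("end_time", ""))
--         if s is None or e is None:
--             continue
--         if s <= t_sec <= e:
--             return {
--                 "regime": r.get("regime", ""),
--                 "vol_state": r.get("vol_state", ""),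
--                 "confidence": r.get("confidence", ""),
--                 "duration_min": r.get("duration_min", ""),
--                 "start_time": r.get("start_time", ""),
--                 "end_time": r.get("end_time", ""),
--             }
--         dist = min(abs(t_sec - s), abs(t_sec - e))
--         if best is None or (best_dist is not None and dist < best_dist):
--             best = r
--             best_dist = dist
--
--     if best is None:
--         return fallback
--     return {
--         "regime": best.get("regime", ""),
--         "vol_state": best.get("vol_state", ""),
--         "confidence": best.get("confidence", ""),
--         "duration_min": best.get("duration_min", ""),
--         "start_time": best.get("start_time", ""),
--         "end_time": best.get("end_time", ""),
--     }
-- ===== SOURCE B (Python) =====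
-- # B: rank-and-select — one total ranking function (0 for a containing interval,
-- # 1 + distance-to-nearest-endpoint otherwise) and a single stable min(); no
-- # containment early-return, no running best/best_dist accumulator.
-- from typing import Dict, List, Optional
--
-- def time_to_seconds(t: str) -> Optional[int]:
--     # unchanged same-module helper
--     raw = (t or "").strip()
--     if not raw:
--         return None
--     parts = raw.split(":")
--     if len(parts) == 2:
--         raw = f"{raw}:00"
--         parts = raw.split(":")
--     if len(parts) != 3:
--         return None
--     try:
--         h = int(parts[0]); m = int(parts[1]); s = int(parts[2])
--         return h * 3600 + m * 60 + s
--     except Exception: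
--         return None
--
-- _FIELDS = ("regime", "vol_state", "confidence", "duration_min", "start_time", "end_time")
--
-- def _rank(r: Dict[str, str], t_sec: int) -> Optional[int]:
--     # 0 iff the interval contains t_sec; otherwise 1 + distance to the nearer
--     # endpoint (>= 1), so any containing interval outranks every other one and
--     # distances keep their order; None for an unparsable regime.
--     s = time_to_seconds(r.get("start_time", ""))
--     e = time_to_seconds(r.get("end_time", ""))
--     if s is None or e is None:
--         return None
--     return 0 if s <= t_sec <= e else 1 + min(abs(t_sec - s), abs(t_sec - e))
--
-- def find_regime_context(
--     regimes: List[Dict[str, str]],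
--     t_sec: int,
-- ) -> Dict[str, str]:
--     ranked = [(k, r) for r in regimes for k in (_rank(r, t_sec),) if k is not None]
--     if not ranked:
--         return {f: "" for f in _FIELDS}
--     best = min(ranked, key=lambda p: p[0])[1]   # stable: keeps the earliest minimum
--     return {f: best.get(f, "") for f in _FIELDS}
-- ===== Notes on version B (the rewrite author's own statement) =====
-- stated objective: alternative
-- what changed: Replaces A's two-case control flow (early return on the first containing interval plus a running best/best_dist accumulator for the nearest one) with a single total ranking function (0 for a containing interval, 1 + distance-to-nearest-endpoint otherwise) and one stable min() over the ranked regimes; stability of min and the rank gap 0 < 1+dist reproduce A's earliest-containing and earliest-nearest tie rules.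
import Mathlib
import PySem

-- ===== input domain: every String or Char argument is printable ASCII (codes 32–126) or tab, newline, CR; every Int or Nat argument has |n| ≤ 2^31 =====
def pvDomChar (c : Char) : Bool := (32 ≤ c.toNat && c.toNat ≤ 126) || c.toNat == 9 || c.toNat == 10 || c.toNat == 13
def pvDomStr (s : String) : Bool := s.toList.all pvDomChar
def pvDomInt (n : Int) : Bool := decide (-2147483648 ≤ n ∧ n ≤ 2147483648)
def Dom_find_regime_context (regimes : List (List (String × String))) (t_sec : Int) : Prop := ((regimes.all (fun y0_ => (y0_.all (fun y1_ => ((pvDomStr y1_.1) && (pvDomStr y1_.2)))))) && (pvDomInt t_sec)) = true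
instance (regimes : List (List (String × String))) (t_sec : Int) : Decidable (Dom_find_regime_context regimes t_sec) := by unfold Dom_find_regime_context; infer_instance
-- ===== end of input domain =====

-- B replaces A's two-case control flow (containment early return + best/best_dist accumulator)
-- by one total ranking function and a single stable min(); same return value everywhere, A is
-- total, no speed claim.

-- shared same-module helper: time_to_seconds (used verbatim by both Pythons)
def pvT2S (t : String) : Option Int :=
  let raw := PySem.Chars.strip t.toList
  if raw = [] then none
  else
    let parts := PySem.Chars.splitOn raw [':']
    let parts := if parts.length = 2 then PySem.Chars.splitOn (raw ++ [':', '0', '0']) [':'] else parts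
    if parts.length ≠ 3 then none
    else
      match PySem.Int.ofChars? (parts.getD 0 []), PySem.Int.ofChars? (parts.getD 1 []),
            PySem.Int.ofChars? (parts.getD 2 []) with
      | some h, some m, some s => some (h * 3600 + m * 60 + s)
      | _, _, _ => none

-- r.get(k, "") on the Python dict r
def pvGetS (r : List (String × String)) (k : String) : String :=
  PySem.Dict.getD (PySem.Dict.ofList r) k ""

def pvFallback : List (String × String) :=
  [("regime", ""), ("vol_state", ""), ("confidence", ""), ("duration_min", ""),
   ("start_time", ""), ("end_time", "")]

-- the six-key result dict both Pythons build from a chosen regime r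
def pvProject (r : List (String × String)) : List (String × String) :=
  [("regime", pvGetS r "regime"), ("vol_state", pvGetS r "vol_state"),
   ("confidence", pvGetS r "confidence"), ("duration_min", pvGetS r "duration_min"),
   ("start_time", pvGetS r "start_time"), ("end_time", pvGetS r "end_time")]

-- ===== PORT A =====
-- A's for-loop with early return and the best/best_dist accumulator
def pvLoopA (t_sec : Int) (best : Option (List (String × String))) (bestDist : Option Int) :
    List (List (String × String)) → List (String × String)
  | [] =>
    match best with
    | none => pvFallback
    | some r => pvProject r
  | r :: rest =>
    match pvT2S (pvGetS r "start_time"), pvT2S (pvGetS r "end_time") with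
    | some s, some e =>
      if s ≤ t_sec ∧ t_sec ≤ e then pvProject r
      else
        let dist := min |t_sec - s| |t_sec - e|
        if best.isNone || (match bestDist with | some bd => decide (dist < bd) | none => false)
        then pvLoopA t_sec (some r) (some dist) rest
        else pvLoopA t_sec best bestDist rest
    | _, _ => pvLoopA t_sec best bestDist rest

def find_regime_context (regimes : List (List (String × String))) (t_sec : Int) : List (String × String) :=
  if regimes = [] then pvFallback
  else pvLoopA t_sec none none regimes

-- ===== PORT B =====
-- _rank: 0 iff the interval contains t_sec, else 1 + distance to the nearer endpoint; none if unparsable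
def pvRank (t_sec : Int) (r : List (String × String)) : Option Int :=
  match pvT2S (pvGetS r "start_time"), pvT2S (pvGetS r "end_time") with
  | some s, some e =>
    some (if s ≤ t_sec ∧ t_sec ≤ e then 0 else 1 + min |t_sec - s| |t_sec - e|)
  | _, _ => none

def find_regime_context_alt (regimes : List (List (String × String))) (t_sec : Int) : List (String × String) :=
  let ranked := regimes.filterMap (fun r => (pvRank t_sec r).map (fun k => (k, r)))
  match PySem.List.min? ranked (fun p => p.1) with  -- none exactly when ranked = [] (Source B's empty check)
  | none => pvFallback
  | some p => pvProject p.2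

-- ===== PRECONDITION & SPEC =====
def Spec_find_regime_context (regimes : List (List (String × String))) (t_sec : Int) (out : List (String × String)) : Prop := out = find_regime_context_alt regimes t_sec
instance (regimes : List (List (String × String))) (t_sec : Int) (out : List (String × String)) : Decidable (Spec_find_regime_context regimes t_sec out) := by unfold Spec_find_regime_context; infer_instance

-- ===== CLAIM (what is proved, stated in full; the proofs are below) =====
def Claim_equal_find_regime_context : Prop := ∀ (regimes : List (List (String × String))) (t_sec : Int), Dom_find_regime_context regimes t_sec → Spec_find_regime_context regimes t_sec (find_regime_context regimes t_sec)

-- ===== LEMMAS AND PROOFS =====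

-- the accumulator step of Python's min(): keep the first minimal element (key = rank)
def pvCombine (acc : Option (Int × List (String × String))) (v : Int × List (String × String)) :
    Option (Int × List (String × String)) :=
  match acc with
  | none => some v
  | some m => if v.1 < m.1 then some v else some m

theorem min?_eq_foldl_pvCombine (xs : List (Int × List (String × String))) :
    PySem.List.min? xs (fun p => p.1) = xs.foldl pvCombine none := by
  simp only [PySem.List.min?]
  congr 1
  funext acc x
  cases acc <;> rfl

-- every rank B assigns is nonnegative
theorem pvRank_nonneg (t_sec : Int) (r : List (String × String)) (k : Int)
    (h : pvRank t_sec r = some k) : 0 ≤ k := by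
  unfold pvRank at h
  split at h
  · simp only [Option.some.injEq] at h
    subst h
    split
    · exact le_refl 0
    · positivity
  · exact absurd h (by simp)

-- once min()'s accumulator holds a rank-0 element, no later nonnegative rank replaces it
theorem foldl_keep_zero (p : Int × List (String × String)) (hp : p.1 = 0) :
    ∀ xs : List (Int × List (String × String)), (∀ x ∈ xs, 0 ≤ x.1) →
      xs.foldl pvCombine (some p) = some p := by
  intro xs
  induction xs with
  | nil => intro _; rfl
  | cons x rest ih =>
    intro h
    have hx : ¬ x.1 < p.1 := by
      have := h x (by simp); omega
    simp only [List.foldl_cons, pvCombine, if_neg hx]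
    exact ih (fun y hy => h y (by simp [hy]))

-- elements of B's ranked list have nonnegative rank
theorem ranked_nonneg (t_sec : Int) (rs : List (List (String × String))) :
    ∀ x ∈ rs.filterMap (fun r => (pvRank t_sec r).map (fun k => (k, r))), 0 ≤ x.1 := by
  intro x hx
  rcases List.mem_filterMap.mp hx with ⟨r, _, hr⟩
  cases hk : pvRank t_sec r <;> rw [hk] at hr
  · exact absurd hr (by simp)
  · simp only [Option.map_some, Option.some.injEq] at hr
    subst hr
    exact pvRank_nonneg t_sec r _ hk

-- the loop invariant: A's (best, best_dist) state corresponds to min()'s accumulator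
-- holding a non-containing element of rank bestDist + 1
theorem pvLoopA_eq (t_sec : Int) :
    ∀ (rs : List (List (String × String))) (acc : Option (Int × List (String × String))),
      (∀ p, acc = some p → 1 ≤ p.1) →
      pvLoopA t_sec (acc.map (·.2)) (acc.map (fun p => p.1 - 1)) rs =
        match (rs.filterMap (fun r => (pvRank t_sec r).map (fun k => (k, r)))).foldl pvCombine acc with
        | none => pvFallback
        | some m => pvProject m.2 := by
  intro rs
  induction rs with
  | nil => intro acc _; cases acc <;> rfl
  | cons r rest ih =>
    intro acc hacc
    cases hs : pvT2S (pvGetS r "start_time") with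
    | none =>
      have hp : pvRank t_sec r = none := by simp [pvRank, hs]
      simp only [pvLoopA, hs, List.filterMap_cons, hp, Option.map_none]
      exact ih acc hacc
    | some s =>
      cases he : pvT2S (pvGetS r "end_time") with
      | none =>
        have hp : pvRank t_sec r = none := by simp [pvRank, hs, he]
        simp only [pvLoopA, hs, he, List.filterMap_cons, hp, Option.map_none]
        exact ih acc hacc
      | some e =>
        by_cases hc : s ≤ t_sec ∧ t_sec ≤ e
        · -- containing: A returns r at once; B's min keeps the rank-0 element (r) to the end
          have hp : pvRank t_sec r = some 0 := by simp [pvRank, hs, he, hc]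
          have hacc' : pvCombine acc (0, r) = some (0, r) := by
            cases acc with
            | none => rfl
            | some m =>
              have : (1 : Int) ≤ m.1 := hacc m rfl
              simp only [pvCombine]
              rw [if_pos (by omega)]
          simp only [pvLoopA, hs, he, if_pos hc, List.filterMap_cons, hp, Option.map_some,
            List.foldl_cons, hacc']
          rw [foldl_keep_zero (0, r) rfl _ (ranked_nonneg t_sec rest)]
        · -- not containing: A's dist comparison = B's rank comparison shifted by one
          have hp : pvRank t_sec r = some (1 + min |t_sec - s| |t_sec - e|) := by
            simp [pvRank, hs, he, hc]
          simp only [pvLoopA, hs, he, if_neg hc, List.filterMap_cons, hp, Option.map_some,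
            List.foldl_cons]
          cases acc with
          | none =>
            have : pvCombine none (1 + min |t_sec - s| |t_sec - e|, r)
                = some (1 + min |t_sec - s| |t_sec - e|, r) := rfl
            simp only [Option.map_none, Option.isNone_none, Bool.true_or, if_pos, this]
            have := ih (some (1 + min |t_sec - s| |t_sec - e|, r))
              (by intro p hpp; cases hpp; simp)
            simpa using this
          | some m =>
            have hm1 : (1 : Int) ≤ m.1 := hacc m rfl
            simp only [Option.map_some, Option.isNone_some, Bool.false_or]
            by_cases hlt : min |t_sec - s| |t_sec - e| < m.1 - 1
            · rw [if_pos (decide_eq_true hlt)]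
              have hcmb : pvCombine (some m) (1 + min |t_sec - s| |t_sec - e|, r)
                  = some (1 + min |t_sec - s| |t_sec - e|, r) := by
                simp only [pvCombine]; rw [if_pos (by omega)]
              rw [hcmb]
              have := ih (some (1 + min |t_sec - s| |t_sec - e|, r))
                (by intro p hpp; cases hpp; simp)
              simpa using this
            · rw [if_neg (by simp [hlt])]
              have hcmb : pvCombine (some m) (1 + min |t_sec - s| |t_sec - e|, r) = some m := by
                simp only [pvCombine]; rw [if_neg (by omega)]
              rw [hcmb]
              exact ih (some m) hacc

-- ===== VERDICT (by name: the statement is the Claim_ definition above) =====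
theorem find_regime_context_spec : Claim_equal_find_regime_context := by
  intro regimes t_sec _
  unfold Spec_find_regime_context find_regime_context find_regime_context_alt
  by_cases h : regimes = []
  · subst h; rfl
  · simp only [if_neg h]
    have := pvLoopA_eq t_sec regimes none (by intro p hp; cases hp)
    simp only [Option.map_none] at this
    rw [this, min?_eq_foldl_pvCombine]
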